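-- pv_equiv track=rewrite | github.com/violet-burbank/Text-ID | TextID.py | makePuncCountDictionary
-- ===== SOURCE A (Python) =====
-- def makePuncCountDictionary (puncList):
--     """ returns a dictionary of punctuation marks and their frequencies """
--     puncCountDictionary = {}
--     for i in puncList:
--         if not (i in list(puncCountDictionary.keys())):
--             puncCountDictionary[i] = 1
--         else:
--             puncCountDictionary[i] += 1
--
--     return puncCountDictionary
-- ===== SOURCE B (Python) =====
-- def makePuncCountDictionary (puncList):
--     """ returns a dictionary of punctuation marks and their frequencies """
--     return {c: puncList.count(c) for c in dict.fromkeys(puncList)}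
-- ===== Notes on version B (the rewrite author's own statement) =====
-- stated objective: simpler
-- what changed: Replaces A's single accumulating pass (with a linear key-membership scan per element) by a two-phase strategy: collect the distinct marks in first-appearance order via dict.fromkeys, then count each with list.count.
import Mathlib
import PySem

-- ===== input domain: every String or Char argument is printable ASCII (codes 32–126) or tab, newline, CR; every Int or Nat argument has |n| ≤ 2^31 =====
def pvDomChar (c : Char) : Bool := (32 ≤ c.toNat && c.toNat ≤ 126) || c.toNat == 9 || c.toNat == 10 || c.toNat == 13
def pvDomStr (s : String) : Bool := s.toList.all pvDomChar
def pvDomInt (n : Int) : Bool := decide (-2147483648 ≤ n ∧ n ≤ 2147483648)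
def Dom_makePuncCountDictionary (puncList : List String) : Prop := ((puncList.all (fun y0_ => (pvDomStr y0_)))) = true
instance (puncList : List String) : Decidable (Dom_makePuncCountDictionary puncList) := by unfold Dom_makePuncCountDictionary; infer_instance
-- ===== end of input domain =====

-- B replaces A's single accumulating pass by 'find distinct keys, then count each'; objective: simpler.

-- ===== PORT A =====
-- one accumulating pass over puncList: new key ↦ 1, seen key ↦ +1
def makePuncCountDictionary (puncList : List String) : List (String × Int) :=
  (puncList.foldl
    (fun d i =>
      if !((PySem.Dict.keys d).contains i) then d.insert i 1
      else d.insert i (d.getD i 0 + 1))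
    PySem.Dict.empty).items

-- ===== PORT B =====
-- {c: puncList.count(c) for c in dict.fromkeys(puncList)}
def makePuncCountDictionary_alt (puncList : List String) : List (String × Int) :=
  (PySem.List.dedup puncList).map (fun c => (c, (puncList.count c : Int)))

-- ===== PRECONDITION & SPEC =====
def Spec_makePuncCountDictionary (puncList : List String) (out : List (String × Int)) : Prop := out = makePuncCountDictionary_alt puncList
instance (puncList : List String) (out : List (String × Int)) : Decidable (Spec_makePuncCountDictionary puncList out) := by unfold Spec_makePuncCountDictionary; infer_instance

-- ===== CLAIM (what is proved, stated in full; the proofs are below) =====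
def Claim_equal_makePuncCountDictionary : Prop := ∀ (puncList : List String), Dom_makePuncCountDictionary puncList → Spec_makePuncCountDictionary puncList (makePuncCountDictionary puncList)

-- ===== LEMMAS AND PROOFS =====

-- A's step function is the counting-insert step: on an unseen key, getD is the default 0.
theorem pv_stepA_eq :
    (fun (d : PySem.Dict String Int) (i : String) =>
      if !((PySem.Dict.keys d).contains i) then d.insert i 1
      else d.insert i (d.getD i 0 + 1)) =
    (fun (d : PySem.Dict String Int) (i : String) => d.insert i (d.getD i 0 + 1)) := by
  funext d i
  by_cases h : d.contains i = true
  · have hm : i ∈ d.keys := (PySem.Dict.contains_iff_mem_keys d i).mp h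
    simp [hm]
  · have hf : d.contains i = false := by simpa using h
    have hm : i ∉ d.keys := fun hmem => h ((PySem.Dict.contains_iff_mem_keys d i).mpr hmem)
    have hd : d.getD i 0 = 0 := PySem.Dict.getD_of_not_contains d 0 hf
    simp [hm, hd]

-- ===== VERDICT (by name: the statement is the Claim_ definition above) =====
theorem makePuncCountDictionary_spec : Claim_equal_makePuncCountDictionary := by
  intro puncList _
  show _ = _
  rw [makePuncCountDictionary, makePuncCountDictionary_alt, pv_stepA_eq,
    PySem.Dict.foldl_insert_getD_add_one_eq_counter, PySem.Dict.items_counter,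
    PySem.List.dedup_eq_ofList]
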